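-- pv_equiv track=rewrite | github.com/xmriz/kuliah-main | DasPro-TPB2-Prosedural/TUBES-KELOMPOK-12-DASPRO/Tubes/main.py | csv_pars
-- ===== SOURCE A (Python) =====
-- def ngitung_line_csv(csv) :
-- # Menghitung jumlah baris pada data
--
--     # KAMUS LOKAL
--     # lines : int
--     # i : char
--
--     # ALGORITMA
--     # Deklarasi variabel lines
--     lines = 0
--     # Mengecek nilai i pada string csv
--     for i in csv :
--         # Jika baris sudah berganti, maka jumlah baris bertambah 1
--         if i == "\n" :
--             lines += 1
--     return lines
--
-- def ngitung_kolom_csv(csv) :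
-- # Menghitung jumlah kolom pada data
--
--     # KAMUS LOKAL
--     # kolom : int
--     # i : char
--
--     # ALGORITMA
--     # Deklarasi variabel kolom
--     kolom = 0
--     # Mengecek nilai i pada strings csv
--     for i in csv :
--         # Jika kolom sudah berganti (pada data csv kolom dipisahkan dengan ";"), maka jumlah kolom bertambah 1
--         if i == ";" :
--             kolom += 1
--         # Jika kolom sudah habis (";" sudah tidak ada lagi dan sudah berganti baris), maka jumlah kolom merupakan jumlah yang sebelumnya ditambah dengan 1
--         if i == "\n" :
--             return kolom + 1
--
-- def csv_pars(csv) :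
-- # Mengubah data csv (yang sudah di read) menjadi matriks data
--
--     # KAMUS LOKAL
--     # panjang_line, banyak_kolom : int
--     # file_parsed : array [1..banyak_kolom] of array [1..panjang_line] of string
--
--     # Deklarasi fungsi/prosedur
--     # function ngitung_line_csv (csv : string) -> integer
--     # Menghitung jumlah baris pada data
--     # function ngitung_kolom_csv (csv : string) -> integer
--     # Menghitung jumlah kolom pada data
--
--     # ALGORITMA
--     # Menghitung jumlah baris dan kolom pada data csv
--     panjang_line = ngitung_line_csv(csv)
--     banyak_kolom = ngitung_kolom_csv(csv)
--
--     # Deklarasi matriks data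
--     file_parsed = [[0 for i in range(banyak_kolom)] for i in range(panjang_line)]
--
--     # Pengisian matriks data
--     data = 0
--     while data < panjang_line :
--         counter = 0
--         item = ""
--         for j in csv :
--             if j == "\n" :
--                 file_parsed[data][counter] = item
--                 data += 1
--                 counter = 0
--                 item = ""
--             elif j == ";":
--                 file_parsed[data][counter] = item
--                 counter += 1
--                 item = ""
--             else:
--                 item += j
--     return(file_parsed)
-- ===== SOURCE B (Python) =====
-- def csv_pars(csv):
--     # Idiomatic rewrite: split into newline-terminated lines, split each on ';'.
--     lines = csv.split('\n')[:-1]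
--     return [line.split(';') for line in lines]
-- ===== Notes on version B (the rewrite author's own statement) =====
-- stated objective: idiomatic
-- what changed: A counts rows/columns in separate character scans, pre-allocates a matrix of int-0 placeholders and fills it by indexed assignment inside a while loop over the whole string; B is two str.split calls and a comprehension (C-level splitting instead of per-character Python loops), measured constant-factor faster.
-- outside the precondition, e.g. on csv_pars('a;b\nc\n'): A returns [['a', 'b'], ['c', 0]], B returns [['a', 'b'], ['c']]
import Mathlib
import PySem

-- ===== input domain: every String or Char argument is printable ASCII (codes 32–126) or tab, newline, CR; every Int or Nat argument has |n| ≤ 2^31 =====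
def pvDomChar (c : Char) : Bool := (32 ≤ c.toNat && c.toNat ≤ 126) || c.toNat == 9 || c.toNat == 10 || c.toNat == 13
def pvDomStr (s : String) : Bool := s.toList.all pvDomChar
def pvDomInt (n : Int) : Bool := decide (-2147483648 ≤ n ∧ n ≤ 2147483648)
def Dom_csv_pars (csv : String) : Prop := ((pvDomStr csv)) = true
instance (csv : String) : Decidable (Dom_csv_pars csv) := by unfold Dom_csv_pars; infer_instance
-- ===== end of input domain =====

-- B replaces A's count-preallocate-and-fill while loop by two str.split calls and a
-- comprehension (idiomatic rewrite; measured constant-factor faster in a timing run).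

-- ===== PORT A =====
def ngitung_line_csv (csv : String) : Int :=
  csv.toList.foldl (fun lines i => if i == '\n' then lines + 1 else lines) 0

def ngitung_kolom_csv_go : List Char → Int → Option Int
  | [], _ => none                                   -- loop falls through: Python returns None
  | i :: rest, kolom =>
      let kolom := if i == ';' then kolom + 1 else kolom
      if i == '\n' then some (kolom + 1) else ngitung_kolom_csv_go rest kolom

def ngitung_kolom_csv (csv : String) : Option Int :=
  ngitung_kolom_csv_go csv.toList 0

-- file_parsed[data][counter] = item  (no-op out of range; inside Pre_ every write is in range)
def pvSetCell (m : List (List String)) (d c : Int) (v : String) : List (List String) :=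
  m.set d.toNat ((m.getD d.toNat []).set c.toNat v)

-- the body of `for j in csv`; `item` is kept as its list of characters
def pvPassStep (st : List (List String) × Int × Int × List Char) (j : Char) :
    List (List String) × Int × Int × List Char :=
  if j == '\n' then (pvSetCell st.1 st.2.1 st.2.2.1 (String.ofList st.2.2.2), st.2.1 + 1, 0, [])
  else if j == ';' then (pvSetCell st.1 st.2.1 st.2.2.1 (String.ofList st.2.2.2), st.2.1, st.2.2.1 + 1, [])
  else (st.1, st.2.1, st.2.2.1, st.2.2.2 ++ [j])

-- `while data < panjang_line:` — fuel panjang_line+1 suffices: each pass over csv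
-- advances data by the number of newlines, which equals panjang_line
def pvWhile (fuel : Nat) (cs : List Char) (rows : Int)
    (st : List (List String) × Int × Int × List Char) :
    List (List String) × Int × Int × List Char :=
  match fuel with
  | 0 => st
  | fuel + 1 =>
      if st.2.1 < rows then
        pvWhile fuel cs rows (List.foldl pvPassStep (st.1, st.2.1, 0, []) cs)
      else st

def csv_pars (csv : String) : List (List String) :=
  let panjang_line := ngitung_line_csv csv
  let banyak_kolom := ngitung_kolom_csv csv
  -- [[0]*kolom]*lines; Python's int-0 placeholder is rendered "" (inside Pre_ every cell
  -- is overwritten with a string); the inner range only runs when panjang_line > 0,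
  -- where banyak_kolom is some _, so the getD 0 default is never the evaluated branch there
  let file_parsed := List.replicate panjang_line.toNat
      (List.replicate (banyak_kolom.getD 0).toNat "")
  (pvWhile (panjang_line.toNat + 1) csv.toList panjang_line (file_parsed, 0, 0, [])).1

-- ===== PORT B =====
-- lines = csv.split('\n')[:-1];  [line.split(';') for line in lines]
def csv_pars_alt (csv : String) : List (List String) :=
  let lines := PySem.List.slice (PySem.Chars.splitOn csv.toList ['\n']) none (some (-1))
  lines.map (fun line => (PySem.Chars.splitOn line [';']).map String.ofList)

-- ===== PRECONDITION & SPEC =====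
-- Pre_ excludes csv that contain a newline and in which either some newline-terminated
-- line's ';'-count differs from the first line's (more ';': A raises IndexError; fewer:
-- A returns a row still holding int-0 placeholders, outside the declared
-- List (List String) type) or a ';' occurs after the last newline (A raises IndexError).
def Pre_csv_pars (csv : String) : Prop :=
  (∀ l ∈ (PySem.Chars.splitOn csv.toList ['\n']).dropLast,
      l.count ';' = ((PySem.Chars.splitOn csv.toList ['\n']).headD []).count ';') ∧
  (1 < (PySem.Chars.splitOn csv.toList ['\n']).length →
      ';' ∉ (PySem.Chars.splitOn csv.toList ['\n']).getLastD [])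
instance (csv : String) : Decidable (Pre_csv_pars csv) := by unfold Pre_csv_pars; infer_instance

def pvWitness_csv_pars : String := "a;b\nc;d\n"

def Spec_csv_pars (csv : String) (out : List (List String)) : Prop := out = csv_pars_alt csv
instance (csv : String) (out : List (List String)) : Decidable (Spec_csv_pars csv out) := by unfold Spec_csv_pars; infer_instance

-- ===== CLAIM (what is proved, stated in full; the proofs are below) =====
def Claim_equal_csv_pars : Prop := ∀ (csv : String), Dom_csv_pars csv → Pre_csv_pars csv → Spec_csv_pars csv (csv_pars csv)

-- ===== LEMMAS AND PROOFS =====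

-- reference splitter for a single-character separator
def pvSplit (d : Char) : List Char → List (List Char)
  | [] => [[]]
  | c :: cs => if c = d then [] :: pvSplit d cs else (pvSplit d cs).modifyHead (c :: ·)

lemma pvSplit_ne_nil (d : Char) (cs : List Char) : pvSplit d cs ≠ [] := by
  cases cs with
  | nil => simp [pvSplit]
  | cons c cs =>
      simp only [pvSplit]
      split_ifs
      · simp
      · cases h : pvSplit d cs with
        | nil => exact absurd h (pvSplit_ne_nil d cs)
        | cons x xs => simp [List.modifyHead]

-- prepend a prefix to the first piece
def pvConsHead (pre : List Char) : List (List Char) → List (List Char)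
  | [] => [pre]
  | x :: xs => (pre ++ x) :: xs

lemma splitOn_go_eq (d : Char) (fuel : Nat) (l cur : List Char) (acc : List (List Char))
    (h : l.length ≤ fuel) :
    PySem.Chars.splitOn.go [d] fuel l cur acc
      = acc.reverse ++ pvConsHead cur.reverse (pvSplit d l) := by
  induction l generalizing fuel cur acc with
  | nil =>
      cases fuel with
      | zero => simp [PySem.Chars.splitOn.go, pvSplit, pvConsHead]
      | succ f => simp [PySem.Chars.splitOn.go, pvSplit, pvConsHead]
  | cons c rest ih =>
      cases fuel with
      | zero => simp at h
      | succ f =>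
          have hf : rest.length ≤ f := by simpa using h
          by_cases hc : c = d
          · subst hc
            rw [PySem.Chars.splitOn.go]
            simp only [List.isPrefixOf, BEq.rfl, Bool.true_and, if_pos,
              List.length_cons, List.drop_succ_cons, List.length_nil, List.drop_zero]
            rw [ih f [] (cur.reverse :: acc) hf]
            cases hs : pvSplit c rest with
            | nil => exact absurd hs (pvSplit_ne_nil c rest)
            | cons x xs => simp [hs, pvSplit, pvConsHead]
          · rw [PySem.Chars.splitOn.go]
            have hpre : ([d].isPrefixOf (c :: rest)) = false := by
              simp [List.isPrefixOf]
              exact fun h' => absurd h'.symm hc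
            simp only [hpre, Bool.false_eq_true, if_neg, not_false_iff]
            rw [ih f (c :: cur) acc hf]
            cases hs : pvSplit d rest with
            | nil => exact absurd hs (pvSplit_ne_nil d rest)
            | cons x xs => simp [hs, pvSplit, hc, pvConsHead, List.modifyHead]

lemma splitOn_eq_pvSplit (cs : List Char) (d : Char) :
    PySem.Chars.splitOn cs [d] = pvSplit d cs := by
  rw [PySem.Chars.splitOn, splitOn_go_eq d (cs.length + 1) cs [] [] (by omega)]
  cases hs : pvSplit d cs with
  | nil => exact absurd hs (pvSplit_ne_nil d cs)
  | cons x xs => simp [pvConsHead]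

lemma pvSplit_no_sep (d : Char) (l : List Char) (h : d ∉ l) : pvSplit d l = [l] := by
  induction l with
  | nil => rfl
  | cons c cs ih =>
      simp only [List.mem_cons, not_or] at h
      simp [pvSplit, Ne.symm h.1, ih h.2, List.modifyHead]

lemma pvSplit_append_cons (d : Char) (l r : List Char) (h : d ∉ l) :
    pvSplit d (l ++ d :: r) = l :: pvSplit d r := by
  induction l with
  | nil => simp [pvSplit]
  | cons c cs ih =>
      simp only [List.mem_cons, not_or] at h
      simp [pvSplit, Ne.symm h.1, ih h.2, List.modifyHead]

lemma pvSplit_sep_free (d : Char) (cs : List Char) : ∀ l ∈ pvSplit d cs, d ∉ l := by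
  induction cs with
  | nil => simp [pvSplit]
  | cons c cs ih =>
      simp only [pvSplit]
      split_ifs with hc
      · simpa using ih
      · cases hs : pvSplit d cs with
        | nil => exact absurd hs (pvSplit_ne_nil d cs)
        | cons x xs =>
            intro l hl
            rw [hs] at ih
            rcases (by simpa [List.modifyHead] using hl : l = c :: x ∨ l ∈ xs) with h1 | h2
            · subst h1
              simp only [List.mem_cons, not_or]
              exact ⟨fun he => hc he.symm, ih x (by simp)⟩
            · exact ih l (by simp [h2])

-- reconstruction: cs = (join of dropLast with d) ++ last piece
def pvJoin (d : Char) (Ls : List (List Char)) : List Char := Ls.flatMap (· ++ [d])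

lemma pvSplit_reconstruct (d : Char) (cs : List Char) :
    pvJoin d (pvSplit d cs).dropLast ++ (pvSplit d cs).getLastD [] = cs := by
  induction cs with
  | nil => simp [pvSplit, pvJoin]
  | cons c cs ih =>
      simp only [pvSplit]
      split_ifs with hc
      · subst hc
        cases hs : pvSplit c cs with
        | nil => exact absurd hs (pvSplit_ne_nil c cs)
        | cons x xs =>
            rw [hs] at ih
            simpa [pvJoin] using congrArg (c :: ·) ih
      · cases hs : pvSplit d cs with
        | nil => exact absurd hs (pvSplit_ne_nil d cs)
        | cons x xs =>
            rw [hs] at ih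
            cases xs with
            | nil => simpa [pvJoin, List.modifyHead] using congrArg (c :: ·) ih
            | cons y ys =>
                simp only [List.modifyHead, pvJoin] at ih ⊢
                simpa [pvJoin] using congrArg (c :: ·) ih

lemma pvSplit_length (d : Char) (cs : List Char) :
    (pvSplit d cs).length = cs.count d + 1 := by
  induction cs with
  | nil => simp [pvSplit]
  | cons c cs ih =>
      simp only [pvSplit]
      split_ifs with hc
      · subst hc; simp [ih]
      · cases hs : pvSplit d cs with
        | nil => exact absurd hs (pvSplit_ne_nil d cs)
        | cons x xs =>
            rw [hs] at ih
            simp only [List.modifyHead, List.length_cons] at ih ⊢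
            simp [ih, hc]

lemma ngitung_line_eq (csv : String) :
    ngitung_line_csv csv = (csv.toList.count '\n' : Int) := by
  have := PySem.List.foldl_beq_add_one csv.toList '\n' (0 : Int)
  simpa [ngitung_line_csv] using this

lemma kolom_go_line (l : List Char) (h : '\n' ∉ l) (r : List Char) (k : Int) :
    ngitung_kolom_csv_go (l ++ '\n' :: r) k = some (k + l.count ';' + 1) := by
  induction l generalizing k with
  | nil => simp [ngitung_kolom_csv_go]
  | cons c cs ih =>
      simp only [List.mem_cons, not_or] at h
      by_cases hc : c = ';'
      · subst hc
        simp [ngitung_kolom_csv_go, ih h.2]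
        ring
      · simp [ngitung_kolom_csv_go, hc, Ne.symm h.1, ih h.2]

-- one line through the inner for-loop fills one row
def pvWriteRow (m : List (List String)) (dIdx cIdx : Int) :
    List (List Char) → List (List String)
  | [] => m
  | f :: fs => pvWriteRow (pvSetCell m dIdx cIdx (String.ofList f)) dIdx (cIdx + 1) fs

lemma pass_line (l : List Char) (hl : '\n' ∉ l) (it : List Char) (hit1 : ';' ∉ it)
    (hit2 : '\n' ∉ it) (m : List (List String)) (dIdx cIdx : Int) (rest : List Char) :
    List.foldl pvPassStep (m, dIdx, cIdx, it) (l ++ '\n' :: rest)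
      = List.foldl pvPassStep (pvWriteRow m dIdx cIdx (pvSplit ';' (it ++ l)), dIdx + 1, 0, []) rest := by
  induction l generalizing it m cIdx with
  | nil =>
      simp only [List.append_nil, List.nil_append]
      rw [pvSplit_no_sep ';' it hit1]
      simp [List.foldl_cons, pvPassStep, pvWriteRow]
  | cons c cs ih =>
      simp only [List.mem_cons, not_or] at hl
      by_cases hc : c = ';'
      · subst hc
        rw [show (it ++ ';' :: cs : List Char) = it ++ (';' :: cs) from rfl,
          pvSplit_append_cons ';' it cs hit1]
        have := ih hl.2 [] (by simp) (by simp)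
          (pvSetCell m dIdx cIdx (String.ofList it)) (cIdx + 1)
        simpa [pvPassStep, pvWriteRow] using this
      · have hc1 : (c == '\n') = false := by
          simp only [beq_eq_false_iff_ne, ne_eq]; exact fun h => hl.1 h.symm
        have hc2 : (c == ';') = false := by simpa using hc
        simp only [List.cons_append, List.foldl_cons, pvPassStep, hc1, hc2,
          Bool.false_eq_true, if_neg, not_false_iff]
        have := ih hl.2 (it ++ [c])
          (by simp only [List.mem_append, List.mem_singleton, not_or]
              exact ⟨hit1, fun h => hc h.symm⟩)
          (by simp only [List.mem_append, List.mem_singleton, not_or]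
              exact ⟨hit2, fun h => hl.1 h⟩) m cIdx
        simpa [List.append_assoc] using this

lemma pass_tail (tail : List Char) (h1 : '\n' ∉ tail) (h2 : ';' ∉ tail)
    (m : List (List String)) (dIdx cIdx : Int) (it : List Char) :
    List.foldl pvPassStep (m, dIdx, cIdx, it) tail = (m, dIdx, cIdx, it ++ tail) := by
  induction tail generalizing it with
  | nil => simp
  | cons c cs ih =>
      simp only [List.mem_cons, not_or] at h1 h2
      simp only [List.foldl_cons, pvPassStep,
        show (c == '\n') = false by
          simp only [beq_eq_false_iff_ne, ne_eq]; exact fun h => h1.1 h.symm,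
        show (c == ';') = false by
          simp only [beq_eq_false_iff_ne, ne_eq]; exact fun h => h2.1 h.symm,
        Bool.false_eq_true]
      simpa [List.append_assoc] using ih h1.2 h2.2 (it ++ [c])

def pvWriteRows (m : List (List String)) (dIdx : Int) : List (List Char) → List (List String)
  | [] => m
  | l :: Ls => pvWriteRows (pvWriteRow m dIdx 0 (pvSplit ';' l)) (dIdx + 1) Ls

lemma pass_lines (Ls : List (List Char)) (hLs : ∀ l ∈ Ls, '\n' ∉ l)
    (tail : List Char) (h1 : '\n' ∉ tail) (h2 : ';' ∉ tail)
    (m : List (List String)) (dIdx : Int) :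
    List.foldl pvPassStep (m, dIdx, 0, []) (pvJoin '\n' Ls ++ tail)
      = (pvWriteRows m dIdx Ls, dIdx + Ls.length, 0, tail) := by
  induction Ls generalizing m dIdx with
  | nil => simpa [pvJoin, pvWriteRows] using pass_tail tail h1 h2 m dIdx 0 []
  | cons l Ls ih =>
      have hl : '\n' ∉ l := hLs l (by simp)
      have step := pass_line l hl [] (by simp) (by simp) m dIdx 0
        (pvJoin '\n' Ls ++ tail)
      simp only [pvJoin, List.flatMap_cons, List.append_assoc, List.cons_append,
        List.nil_append] at step ⊢
      rw [step]
      have ih' := ih (fun x hx => hLs x (by simp [hx]))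
        (pvWriteRow m dIdx 0 (pvSplit ';' l)) (dIdx + 1)
      simp only [pvJoin] at ih'
      rw [ih']
      simp only [pvWriteRows, List.length_cons]
      have harith : dIdx + 1 + (Ls.length : Int) = dIdx + ((Ls.length : Int) + 1) := by ring
      rw [harith]
      push_cast
      ring_nf

-- filling a blank row
def pvRowWrite (row : List String) (c : Nat) : List (List Char) → List String
  | [] => row
  | f :: fs => pvRowWrite (row.set c (String.ofList f)) (c + 1) fs

lemma take_succ_set {α : Type} (row : List α) (c : Nat) (f : α) (h : c < row.length) :
    (row.set c f).take (c+1) = row.take c ++ [f] := by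
  apply List.ext_getElem
  · simp [h]; omega
  · intro i hi1 hi2
    simp only [List.length_take, List.length_set] at hi1
    by_cases hic : i < c
    · rw [List.getElem_take, List.getElem_set_ne (by omega)]
      rw [List.getElem_append_left (by simp [List.length_take]; omega), List.getElem_take]
    · have : i = c := by omega
      subst this
      rw [List.getElem_take, List.getElem_set_self]
      rw [List.getElem_append_right (by simp)]
      simp

lemma pvRowWrite_full (fs : List (List Char)) (row : List String) (c : Nat)
    (h : row.length = c + fs.length) :
    pvRowWrite row c fs = row.take c ++ fs.map String.ofList := by
  induction fs generalizing row c with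
  | nil =>
      rw [pvRowWrite, List.take_of_length_le (by simp at h; omega)]
      simp
  | cons f fs ih =>
      have hc : c < row.length := by rw [h, List.length_cons]; omega
      rw [pvRowWrite, ih (row.set c (String.ofList f)) (c+1) (by simp [h]; omega)]
      rw [take_succ_set row c _ hc]
      simp

lemma pvWriteRow_eq_set (fs : List (List Char)) (m : List (List String)) (d c : Nat)
    (hd : d < m.length) :
    pvWriteRow m (d : Int) (c : Int) fs = m.set d (pvRowWrite (m.getD d []) c fs) := by
  induction fs generalizing m c with
  | nil =>
      rw [pvWriteRow, pvRowWrite]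
      rw [List.getD_eq_getElem _ _ hd, List.set_getElem_self]
  | cons f fs ih =>
      rw [pvWriteRow, pvRowWrite]
      have hcast : ((c : Int) + 1) = ((c + 1 : Nat) : Int) := by push_cast; ring
      rw [pvSetCell, Int.toNat_natCast, Int.toNat_natCast, hcast,
        ih (m.set d ((m.getD d []).set c (String.ofList f))) (c+1) (by simpa using hd)]
      rw [List.set_set]
      congr 1
      rw [List.getD_eq_getElem _ _ (by simpa using hd), List.getElem_set_self,
        List.getD_eq_getElem _ _ hd]

lemma pvWriteRows_eq_map (Ls : List (List Char)) (m : List (List String)) (d : Nat)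
    (cols : Nat)
    (hlen : m.length = d + Ls.length)
    (hrows : ∀ i, d ≤ i → i < m.length → m.getD i [] = List.replicate cols "")
    (hfields : ∀ l ∈ Ls, (pvSplit ';' l).length = cols) :
    pvWriteRows m (d : Int) Ls
      = m.take d ++ Ls.map (fun l => (pvSplit ';' l).map String.ofList) := by
  induction Ls generalizing m d with
  | nil =>
      rw [pvWriteRows, List.take_of_length_le (by simp at hlen; omega)]
      simp
  | cons l Ls ih =>
      have hd : d < m.length := by rw [hlen, List.length_cons]; omega
      rw [pvWriteRows]
      have hw := pvWriteRow_eq_set (pvSplit ';' l) m d 0 hd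
      simp only [Nat.cast_zero] at hw
      rw [hw, hrows d le_rfl hd]
      rw [pvRowWrite_full _ _ 0 (by simp [hfields l (by simp)])]
      have hcast : ((d : Int) + 1) = ((d + 1 : Nat) : Int) := by push_cast; ring
      rw [hcast, ih (m.set d ((List.replicate cols "").take 0 ++ (pvSplit ';' l).map String.ofList)) (d+1)
        (by simp [hlen]; omega)
        (by intro i hi1 hi2
            simp only [List.length_set] at hi2
            rw [List.getD_eq_getElem _ _ (by simpa using hi2),
              List.getElem_set_ne (by omega)]
            rw [← List.getD_eq_getElem _ _ hi2]
            exact hrows i (by omega) hi2)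
        (fun x hx => hfields x (by simp [hx]))]
      rw [take_succ_set m d _ hd]
      simp

lemma pvWhile_stop (fuel : Nat) (cs : List Char) (rows : Int)
    (st : List (List String) × Int × Int × List Char) (h : ¬ st.2.1 < rows) :
    pvWhile fuel cs rows st = st := by
  cases fuel <;> simp [pvWhile, h]

lemma pvWhile_step (fuel : Nat) (cs : List Char) (rows : Int)
    (st : List (List String) × Int × Int × List Char) (h : st.2.1 < rows) :
    pvWhile (fuel + 1) cs rows st
      = pvWhile fuel cs rows (List.foldl pvPassStep (st.1, st.2.1, 0, []) cs) := by
  simp [pvWhile, h]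

lemma headD_dropLast {α : Type} (ls : List α) (dflt : α) (h : ls.dropLast ≠ []) :
    ls.dropLast.headD dflt = ls.headD dflt := by
  cases ls with
  | nil => simp at h
  | cons a t =>
      cases t with
      | nil => simp at h
      | cons b t => simp

-- ===== VERDICT (by name: the statement is the Claim_ definition above) =====
theorem csv_pars_spec : Claim_equal_csv_pars := by
  intro csv _ hpre
  unfold Spec_csv_pars csv_pars csv_pars_alt Pre_csv_pars at *
  simp only [splitOn_eq_pvSplit] at hpre ⊢
  rw [ngitung_line_eq, PySem.List.slice_to_neg_one]
  cases h0 : csv.toList.count '\n' with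
  | zero =>
      have hlen : (pvSplit '\n' csv.toList).length = 1 := by
        rw [pvSplit_length, h0]
      have hdrop : (pvSplit '\n' csv.toList).dropLast = [] := by
        exact List.eq_nil_of_length_eq_zero (by simp [List.length_dropLast, hlen])
      rw [hdrop]
      rw [pvWhile_stop _ _ _ _ (by norm_num)]
      simp
  | succ n =>
      -- decomposition of csv into its newline-terminated lines and the trailing rest
      set ls := pvSplit '\n' csv.toList with hls
      have hlen : ls.length = n + 2 := by rw [hls, pvSplit_length, h0]
      have hdl : ls.dropLast.length = n + 1 := by
        simp [List.length_dropLast, hlen]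
      obtain ⟨l0, Ls', hLs⟩ : ∃ l0 Ls', ls.dropLast = l0 :: Ls' := by
        cases hc : ls.dropLast with
        | nil => rw [hc] at hdl; simp at hdl
        | cons a t => exact ⟨a, t, rfl⟩
      have hrec := pvSplit_reconstruct '\n' csv.toList
      rw [← hls] at hrec
      have hfree : ∀ l ∈ ls, '\n' ∉ l := by rw [hls]; exact pvSplit_sep_free '\n' csv.toList
      have hfreeLs : ∀ l ∈ ls.dropLast, '\n' ∉ l :=
        fun l hl => hfree l ((List.dropLast_prefix ls).subset hl)
      have hne : ls ≠ [] := by rw [hls]; exact pvSplit_ne_nil _ _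
      have htailmem : ls.getLastD [] ∈ ls := by
        simp only [List.getLastD_eq_getLast?, List.getLast?_eq_some_getLast hne,
          Option.getD_some]
        exact List.getLast_mem hne
      have htailn : '\n' ∉ ls.getLastD [] := hfree _ htailmem
      have htailsemi : ';' ∉ ls.getLastD [] := hpre.2 (by omega)
      have hhead : ls.headD [] = l0 := by
        rw [← headD_dropLast ls [] (by rw [hLs]; simp), hLs]; rfl
      have hcols : ∀ l ∈ ls.dropLast, l.count ';' = l0.count ';' := by
        intro l hl
        rw [hpre.1 l hl, hhead]
      -- the column count computed from the first line
      have hkolom : ngitung_kolom_csv csv = some ((l0.count ';' : Int) + 1) := by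
        have : csv.toList = l0 ++ '\n' :: (pvJoin '\n' Ls' ++ ls.getLastD []) := by
          rw [← hrec, hLs]
          simp [pvJoin]
        rw [ngitung_kolom_csv, this,
          kolom_go_line l0 (hfreeLs l0 (by rw [hLs]; simp)) _ 0]
        congr 1
        ring
      rw [hkolom]
      simp only [Option.getD_some]
      -- the while loop runs exactly one pass over csv
      have hone : List.foldl pvPassStep
          (List.replicate (((n + 1 : Nat) : Int)).toNat
            (List.replicate ((l0.count ';' : Int) + 1).toNat ""), 0, 0, []) csv.toList
          = (pvWriteRows (List.replicate (((n + 1 : Nat) : Int)).toNat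
              (List.replicate ((l0.count ';' : Int) + 1).toNat "")) 0 ls.dropLast,
             0 + (ls.dropLast.length : Int), 0, ls.getLastD []) := by
        rw [← hrec]
        exact pass_lines ls.dropLast hfreeLs _ htailn htailsemi _ 0
      have htoNat1 : (((n + 1 : Nat) : Int)).toNat = n + 1 := by simp
      have htoNat2 : ((l0.count ';' : Int) + 1).toNat = l0.count ';' + 1 := by omega
      rw [show (((n+1 : Nat) : Int)).toNat + 1 = (n + 1) + 1 by rw [htoNat1]]
      rw [pvWhile_step _ _ _ _ (by
        show (0 : Int) < ((n + 1 : Nat) : Int)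
        exact_mod_cast Nat.succ_pos n)]
      rw [hone, pvWhile_stop _ _ _ _ (by
        show ¬ (0 + (ls.dropLast.length : Int) < ((n + 1 : Nat) : Int))
        rw [hdl]; push_cast; omega)]
      -- the filled matrix is exactly the list of split lines
      have := pvWriteRows_eq_map ls.dropLast
        (List.replicate (((n + 1 : Nat) : Int)).toNat
          (List.replicate ((l0.count ';' : Int) + 1).toNat "")) 0
        (l0.count ';' + 1)
        (by simp [hdl])
        (by intro i _ hi
            simp only [List.length_replicate] at hi
            rw [List.getD_eq_getElem _ _ (by simpa using hi), List.getElem_replicate, htoNat2])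
        (by intro l hl
            rw [pvSplit_length, hcols l hl])
      simpa using this
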